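-- pv_equiv track=rewrite | github.com/xuyanfu/RASAOpenQA | Reader/docqa/eval/init_data.py | init_revindex
-- ===== SOURCE A (Python) =====
-- def init_revindex(contents):
--     #contents : words_list
--     stopwords = []
--     revindex = {}
--     dict_doclen = {}
--
--     for content_index in range(len(contents)):
--         words_list = contents[content_index]
--         # for word in words_list:
--         #     if word not in stopwords:
--         tmp_words = words_list
--         #tmp_words = words_list
--         for word in tmp_words:
--             if word not in revindex.keys():
--                 revindex[word] = {}
--                 revindex[word][content_index] = 1
--             else:
--                 if content_index not in revindex[word].keys():
--                     revindex[word][content_index] = 1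
--                 else:
--                     revindex[word][content_index] += 1
--
--         dict_doclen[content_index] = len(words_list)
--
--     return revindex,dict_doclen
-- ===== SOURCE B (Python) =====
-- def rle(xs):
--     # run-length encode a list: [(value, run length)] in order
--     out = []
--     for x in xs:
--         if out and out[-1][0] == x:
--             out[-1] = (x, out[-1][1] + 1)
--         else:
--             out.append((x, 1))
--     return out
--
--
-- def init_revindex(contents):
--     # staged pipeline: flatten to (word, doc) occurrences, group doc indices per word,
--     # then run-length encode each postings list into {doc: count}
--     occ = [(w, i) for i, ws in enumerate(contents) for w in ws]
--     groups = {}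
--     for w, i in occ:
--         groups.setdefault(w, []).append(i)
--     revindex = {w: dict(rle(idxs)) for w, idxs in groups.items()}
--     dict_doclen = {i: len(ws) for i, ws in enumerate(contents)}
--     return revindex, dict_doclen
-- ===== Notes on version B (the rewrite author's own statement) =====
-- stated objective: alternative
-- what changed: A makes one doc-major pass maintaining a nested word->doc->count dict with a three-way conditional update per word occurrence; B is a staged pipeline over a different intermediate data structure: flatten everything to a (word, doc_index) occurrence list, group doc indices per word into flat postings lists, then run-length encode each postings list into the per-word {doc: count} dict, with doc lengths from a separate comprehension.
import Mathlib
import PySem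

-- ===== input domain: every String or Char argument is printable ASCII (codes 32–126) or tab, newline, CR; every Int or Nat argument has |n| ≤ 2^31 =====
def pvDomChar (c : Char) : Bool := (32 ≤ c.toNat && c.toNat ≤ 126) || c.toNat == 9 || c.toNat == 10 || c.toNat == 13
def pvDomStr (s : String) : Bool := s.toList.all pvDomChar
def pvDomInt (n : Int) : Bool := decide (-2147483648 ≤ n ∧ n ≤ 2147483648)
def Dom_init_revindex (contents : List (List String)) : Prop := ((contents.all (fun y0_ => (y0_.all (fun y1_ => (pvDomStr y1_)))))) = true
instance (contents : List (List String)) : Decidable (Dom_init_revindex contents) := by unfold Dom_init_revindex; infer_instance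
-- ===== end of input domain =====

-- B replaces A's doc-major pass with conditional nested-dict updates by a staged pipeline:
-- flatten to (word, doc) occurrences, group doc indices per word, run-length encode each
-- postings list into the per-word {doc: count} dict (alternative decomposition, same cost).


-- ===== PORT A =====
-- A's inner loop body: the three-way branch updating revindex for one word occurrence
def initA_inner (content_index : Int) (rev : PySem.Dict String (PySem.Dict Int Int))
    (word : String) : PySem.Dict String (PySem.Dict Int Int) :=
  if rev.contains word = false then
    rev.insert word ((PySem.Dict.empty).insert content_index 1)
  else
    let d := rev.getD word PySem.Dict.empty
    if d.contains content_index = false then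
      rev.insert word (d.insert content_index 1)
    else
      rev.insert word (d.insert content_index (d.getD content_index 0 + 1))

def init_revindex (contents : List (List String)) : (List (String × List (Int × Int))) × (List (Int × Int)) :=
  let st := (PySem.List.enumerate contents 0).foldl
    (fun (st : PySem.Dict String (PySem.Dict Int Int) × PySem.Dict Int Int) p =>
      (p.2.foldl (initA_inner p.1) st.1, st.2.insert p.1 (p.2.length : Int)))
    (PySem.Dict.empty, PySem.Dict.empty)
  (st.1.items.map (fun q => (q.1, q.2.items)), st.2.items)

-- ===== PORT B =====
-- run-length encoding step: `if out and out[-1][0] == x: out[-1] = (x, out[-1][1]+1) else: out.append((x, 1))`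
def rleStep (out : List (Int × Int)) (x : Int) : List (Int × Int) :=
  match out.getLast? with
  | some (y, c) => if y == x then out.dropLast ++ [(x, c + 1)] else out ++ [(x, 1)]
  | none => out ++ [(x, 1)]

def rle (xs : List Int) : List (Int × Int) := xs.foldl rleStep []

-- occ = [(w, i) for i, ws in enumerate(contents) for w in ws]
def pvOcc (contents : List (List String)) : List (String × Int) :=
  (PySem.List.enumerate contents 0).flatMap (fun p => p.2.map (fun w => (w, p.1)))

-- groups.setdefault(w, []).append(i)  ==  groups[w] = groups.get(w, []) + [i]  (Dict.modify)
def pvGroups (contents : List (List String)) : PySem.Dict String (List Int) :=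
  (pvOcc contents).foldl (fun g p => g.modify p.1 [] (fun l => l ++ [p.2])) PySem.Dict.empty

def init_revindex_alt (contents : List (List String)) : (List (String × List (Int × Int))) × (List (Int × Int)) :=
  let revindex : PySem.Dict String (PySem.Dict Int Int) :=
    (pvGroups contents).items.foldl
      (fun d p => d.insert p.1 (PySem.Dict.ofList (rle p.2))) PySem.Dict.empty
  let doclen : PySem.Dict Int Int :=
    (PySem.List.enumerate contents 0).foldl
      (fun d p => d.insert p.1 (p.2.length : Int)) PySem.Dict.empty
  (revindex.items.map (fun q => (q.1, q.2.items)), doclen.items)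

-- ===== PRECONDITION & SPEC =====
def Spec_init_revindex (contents : List (List String)) (out : (List (String × List (Int × Int))) × (List (Int × Int))) : Prop := out = init_revindex_alt contents
instance (contents : List (List String)) (out : (List (String × List (Int × Int))) × (List (Int × Int))) : Decidable (Spec_init_revindex contents out) := by unfold Spec_init_revindex; infer_instance

-- ===== CLAIM (what is proved, stated in full; the proofs are below) =====
def Claim_equal_init_revindex : Prop := ∀ (contents : List (List String)), Dom_init_revindex contents → Spec_init_revindex contents (init_revindex contents)

-- ===== LEMMAS AND PROOFS =====

-- the per-word postings both sides produce: (doc index, count) for each doc containing w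
def postingsOf (contents : List (List String)) (s : Int) (w : String) : List (Int × Int) :=
  ((PySem.List.enumerate contents s).filter (fun p => decide (w ∈ p.2))).map
    (fun p => (p.1, (p.2.count w : Int)))

-- invariant entering document index i: unique top-level keys, and all inner keys are earlier doc indices
def RevInv (rev : PySem.Dict String (PySem.Dict Int Int)) (i : Int) : Prop :=
  rev.keys.Nodup ∧ ∀ p ∈ rev.items, ∀ k ∈ p.2.keys, k < i

-- A's step is an unconditional insert of an updated inner dict
theorem initA_inner_eq (i : Int) (rev : PySem.Dict String (PySem.Dict Int Int)) (w : String) :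
    initA_inner i rev w =
      rev.insert w ((rev.getD w PySem.Dict.empty).insert i
        ((rev.getD w PySem.Dict.empty).getD i 0 + 1)) := by
  unfold initA_inner
  by_cases h : rev.contains w
  · by_cases h2 : (rev.getD w PySem.Dict.empty).contains i
    · simp [h, h2]
    · simp only [Bool.not_eq_true] at h2
      simp [h, h2, PySem.Dict.getD_of_not_contains _ _ h2]
  · simp only [Bool.not_eq_true] at h
    simp [h, PySem.Dict.getD_of_not_contains _ _ h, PySem.Dict.getD_empty]

-- inner keys of any value looked up in an invariant-satisfying dict are earlier indices
theorem getD_keys_lt (i : Int) (rev0 : PySem.Dict String (PySem.Dict Int Int))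
    (h : ∀ p ∈ rev0.items, ∀ k ∈ p.2.keys, k < i) (w : String) :
    ∀ k ∈ (rev0.getD w PySem.Dict.empty).keys, k < i := by
  by_cases hc : rev0.contains w
  · rw [PySem.Dict.contains_eq_isSome_get?] at hc
    obtain ⟨d, hd⟩ : ∃ d, rev0.get? w = some d := by
      cases hget : rev0.get? w with
      | none => rw [hget] at hc; simp at hc
      | some d => exact ⟨d, rfl⟩
    rw [PySem.Dict.getD_eq_get?_getD, hd]
    exact h _ (PySem.Dict.mem_items_of_get?_eq_some _ hd)
  · simp only [Bool.not_eq_true] at hc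
    rw [PySem.Dict.getD_of_not_contains _ _ hc]
    simp [PySem.Dict.keys_empty]

-- hence the current index has count 0 in any such inner dict
theorem getD_i_zero (i : Int) (rev0 : PySem.Dict String (PySem.Dict Int Int))
    (h : ∀ p ∈ rev0.items, ∀ k ∈ p.2.keys, k < i) (w : String) :
    (rev0.getD w PySem.Dict.empty).getD i 0 = 0 := by
  apply PySem.Dict.getD_of_not_contains
  by_contra hcon
  simp only [Bool.not_eq_false] at hcon
  rw [PySem.Dict.contains_iff_mem_keys] at hcon
  exact absurd (getD_keys_lt i rev0 h w i hcon) (lt_irrefl i)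

-- lookup after A's per-occurrence inner fold, given no inner dict mentions i yet
theorem getD_foldA (i : Int) (ws : List String) (rev0 : PySem.Dict String (PySem.Dict Int Int))
    (h : ∀ p ∈ rev0.items, ∀ k ∈ p.2.keys, k < i) (w : String) :
    (ws.foldl (initA_inner i) rev0).getD w PySem.Dict.empty =
      if w ∈ ws then (rev0.getD w PySem.Dict.empty).insert i (ws.count w : Int)
      else rev0.getD w PySem.Dict.empty := by
  induction ws using List.reverseRecOn with
  | nil => simp
  | append_singleton ws v ih =>
    rw [List.foldl_append]
    simp only [List.foldl_cons, List.foldl_nil]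
    rw [initA_inner_eq, PySem.Dict.getD_insert]
    by_cases hw : w = v
    · subst hw
      rw [if_pos rfl, ih]
      by_cases hm : w ∈ ws
      · rw [if_pos hm, if_pos (by simp), PySem.Dict.getD_insert_self, PySem.Dict.insert_insert_self]
        have hc : ((ws ++ [w]).count w : Int) = (ws.count w : Int) + 1 := by
          simp [List.count_append]
        rw [hc]
      · rw [if_neg hm, if_pos (by simp), getD_i_zero i rev0 h w]
        have hc : ((ws ++ [w]).count w : Int) = 0 + 1 := by
          simp [List.count_append, List.count_eq_zero.mpr hm]
        rw [hc]
    · rw [if_neg hw, ih]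
      have hcnt : (ws ++ [v]).count w = ws.count w := by
        have h0 : [v].count w = 0 := List.count_eq_zero.mpr (by simp [hw])
        simp [List.count_append, h0]
      rw [hcnt]
      by_cases hm : w ∈ ws <;> simp [hm, hw]

-- the invariant survives one document
theorem inv_step (i : Int) (ws : List String) (rev0 : PySem.Dict String (PySem.Dict Int Int))
    (hinv : RevInv rev0 i) : RevInv (ws.foldl (initA_inner i) rev0) (i + 1) := by
  obtain ⟨hnd, hlt⟩ := hinv
  have hA : ws.foldl (initA_inner i) rev0 =
      ws.foldl (fun rev w => rev.insert w ((rev.getD w PySem.Dict.empty).insert i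
        ((rev.getD w PySem.Dict.empty).getD i 0 + 1))) rev0 :=
    PySem.List.foldl_congr_mem _ _ _ _ (fun acc x _ => initA_inner_eq i acc x)
  have hndA : (ws.foldl (initA_inner i) rev0).keys.Nodup := by
    rw [hA]
    exact PySem.Dict.nodup_keys_foldl_insert ws
      (fun d x => (d.getD x PySem.Dict.empty).insert i ((d.getD x PySem.Dict.empty).getD i 0 + 1)) rev0 hnd
  refine ⟨hndA, ?_⟩
  intro p hp k hk
  have hget : (ws.foldl (initA_inner i) rev0).getD p.1 PySem.Dict.empty = p.2 := by
    have hp' : (p.1, p.2) ∈ (ws.foldl (initA_inner i) rev0).items := by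
      rw [Prod.mk.eta]; exact hp
    exact PySem.Dict.getD_of_mem_items _ hp' hndA _
  rw [getD_foldA i ws rev0 hlt p.1] at hget
  by_cases hm : p.1 ∈ ws
  · rw [if_pos hm] at hget
    rw [← hget] at hk
    rcases (PySem.Dict.mem_keys_insert _ _ _ _).mp hk with h1 | h2
    · omega
    · have := getD_keys_lt i rev0 hlt p.1 k h2
      omega
  · rw [if_neg hm] at hget
    rw [← hget] at hk
    have := getD_keys_lt i rev0 hlt p.1 k hk
    omega

-- A's outer fold: the doc-length component is an independent fold (B's doclen fold)
theorem outerA_snd (contents : List (List String)) (s : Int)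
    (rev : PySem.Dict String (PySem.Dict Int Int)) (dl : PySem.Dict Int Int) :
    ((PySem.List.enumerate contents s).foldl
      (fun (st : PySem.Dict String (PySem.Dict Int Int) × PySem.Dict Int Int) p =>
        (p.2.foldl (initA_inner p.1) st.1, st.2.insert p.1 (p.2.length : Int))) (rev, dl)).2 =
    (PySem.List.enumerate contents s).foldl
      (fun (d : PySem.Dict Int Int) p => d.insert p.1 (p.2.length : Int)) dl := by
  induction contents generalizing s rev dl with
  | nil => simp [PySem.List.enumerate]
  | cons ws cs ih =>
    rw [PySem.List.enumerate_cons]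
    simp only [List.foldl_cons]
    exact ih (s + 1) _ _

-- A's outer fold: the top-level key order is the first-occurrence order of all words
theorem outerA_keys (contents : List (List String)) (s : Int)
    (rev : PySem.Dict String (PySem.Dict Int Int)) (dl : PySem.Dict Int Int) :
    ((PySem.List.enumerate contents s).foldl
      (fun (st : PySem.Dict String (PySem.Dict Int Int) × PySem.Dict Int Int) p =>
        (p.2.foldl (initA_inner p.1) st.1, st.2.insert p.1 (p.2.length : Int))) (rev, dl)).1.keys =
    PySem.Set.update rev.keys contents.flatten := by
  induction contents generalizing s rev dl with
  | nil => simp [PySem.List.enumerate, PySem.Set.update]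
  | cons ws cs ih =>
    rw [PySem.List.enumerate_cons]
    simp only [List.foldl_cons]
    rw [ih (s + 1) _ _]
    have hA : ws.foldl (initA_inner s) rev =
        ws.foldl (fun rev w => rev.insert w ((rev.getD w PySem.Dict.empty).insert s
          ((rev.getD w PySem.Dict.empty).getD s 0 + 1))) rev :=
      PySem.List.foldl_congr_mem _ _ _ _ (fun acc x _ => initA_inner_eq s acc x)
    rw [hA, PySem.Dict.keys_foldl_insert, List.flatten_cons, PySem.Set.update_append]

-- A's outer fold: each word's inner dict is the fold of one insert per doc containing it
theorem outerA_getD (contents : List (List String)) (s : Int)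
    (rev : PySem.Dict String (PySem.Dict Int Int)) (dl : PySem.Dict Int Int) (w : String)
    (hinv : RevInv rev s) :
    ((PySem.List.enumerate contents s).foldl
      (fun (st : PySem.Dict String (PySem.Dict Int Int) × PySem.Dict Int Int) p =>
        (p.2.foldl (initA_inner p.1) st.1, st.2.insert p.1 (p.2.length : Int))) (rev, dl)).1.getD w PySem.Dict.empty =
    (PySem.List.enumerate contents s).foldl
      (fun (d : PySem.Dict Int Int) p => if w ∈ p.2 then d.insert p.1 (p.2.count w : Int) else d)
      (rev.getD w PySem.Dict.empty) := by
  induction contents generalizing s rev dl with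
  | nil => simp [PySem.List.enumerate]
  | cons ws cs ih =>
    rw [PySem.List.enumerate_cons]
    simp only [List.foldl_cons]
    rw [ih (s + 1) _ _ (inv_step s ws rev hinv), getD_foldA s ws rev hinv.2 w]

-- the first components of the occurrence list are all the words, in corpus order
theorem occ_map_fst (contents : List (List String)) :
    (pvOcc contents).map (fun q => q.1) = contents.flatten := by
  unfold pvOcc
  rw [List.map_flatMap]
  have h1 : ∀ p : Int × List String,
      (p.2.map (fun w => (w, p.1))).map (fun q : String × Int => q.1) = p.2 := by
    intro p
    have hc : ((fun q : String × Int => q.1) ∘ fun w => (w, p.1)) = fun w => w := rfl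
    rw [List.map_map, hc, List.map_id']
  have h2 : (PySem.List.enumerate contents 0).flatMap
      (fun p => (p.2.map (fun w => (w, p.1))).map (fun q : String × Int => q.1)) =
      (PySem.List.enumerate contents 0).flatMap (fun p => p.2) := by
    exact List.flatMap_congr (fun p _ => h1 p)
  rw [h2, List.flatMap_def, PySem.List.map_snd_enumerate]

-- per document: the occurrences of w map to the doc index repeated count-many times
theorem filter_map_pairs (ws : List String) (i : Int) (w : String) :
    ((ws.map (fun w' => (w', i))).filter (fun q => q.1 == w)).map (fun q => q.2) =
    List.replicate (ws.count w) i := by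
  induction ws with
  | nil => simp
  | cons w' ws ih =>
    simp only [List.map_cons, List.filter_cons]
    by_cases h : w' = w
    · subst h
      simp [ih, List.count_cons, List.replicate_succ]
    · have hb : ((w', i).1 == w) = false := by simpa using h
      simp [hb, ih, List.count_cons, h, Ne.symm h]

-- each word's grouped doc-index list is a concatenation of replicated doc indices
theorem groups_getD (contents : List (List String)) (w : String) :
    (pvGroups contents).getD w [] =
    (PySem.List.enumerate contents 0).flatMap (fun p => List.replicate (p.2.count w) p.1) := by
  unfold pvGroups
  rw [PySem.Dict.getD_foldl_modify_append, PySem.Dict.getD_empty]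
  unfold pvOcc
  rw [List.filter_flatMap, List.map_flatMap]
  simp only [List.nil_append]
  exact List.flatMap_congr (fun p _ => filter_map_pairs p.2 p.1 w)

-- run-length encoding: extending the current run
theorem rle_run (m : Nat) (out : List (Int × Int)) (i : Int) (c : Int) :
    List.foldl rleStep (out ++ [(i, c)]) (List.replicate m i) = out ++ [(i, c + m)] := by
  induction m generalizing c with
  | zero => simp
  | succ m ih =>
    rw [List.replicate_succ, List.foldl_cons]
    have hstep : rleStep (out ++ [(i, c)]) i = out ++ [(i, c + 1)] := by
      unfold rleStep
      rw [List.getLast?_concat]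
      simp [List.dropLast_concat]
    rw [hstep, ih (c + 1)]
    have : c + 1 + (m : Int) = c + ((m : Nat) + 1 : Nat) := by push_cast; ring
    rw [this]

-- run-length encoding: one whole block of a fresh value
theorem rle_block (c : Nat) (i : Int) (out : List (Int × Int))
    (h : ∀ q ∈ out.getLast?, q.1 ≠ i) :
    List.foldl rleStep out (List.replicate c i) =
    out ++ (if c = 0 then [] else [(i, (c : Int))]) := by
  cases c with
  | zero => simp
  | succ m =>
    rw [List.replicate_succ, List.foldl_cons]
    have hstep : rleStep out i = out ++ [(i, 1)] := by
      unfold rleStep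
      cases hl : out.getLast? with
      | none => simp
      | some q =>
        obtain ⟨y, cc⟩ := q
        have hy : y ≠ i := h (y, cc) (by rw [hl]; rfl)
        simp [hy]
    rw [hstep, rle_run m out i 1]
    have : (1 : Int) + (m : Int) = ((m + 1 : Nat) : Int) := by push_cast; ring
    simp [this]

-- run-length encoding the concatenated blocks gives one (doc, count) pair per doc containing w
theorem rle_blocks (contents : List (List String)) (w : String) (s : Int)
    (out : List (Int × Int)) (h : ∀ q ∈ out.getLast?, q.1 < s) :
    List.foldl rleStep out
      ((PySem.List.enumerate contents s).flatMap (fun p => List.replicate (p.2.count w) p.1)) =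
    out ++ postingsOf contents s w := by
  induction contents generalizing s out with
  | nil => simp [PySem.List.enumerate, postingsOf]
  | cons ws cs ih =>
    rw [PySem.List.enumerate_cons]
    simp only [List.flatMap_cons]
    rw [List.foldl_append]
    rw [rle_block (ws.count w) s out (fun q hq => ne_of_lt (h q hq))]
    by_cases hm : w ∈ ws
    · have hc : ws.count w ≠ 0 := by
        simpa [Nat.pos_iff_ne_zero] using List.count_pos_iff.mpr hm
      rw [if_neg hc]
      rw [ih (s + 1) (out ++ [(s, (ws.count w : Int))]) (by simp)]
      simp [postingsOf, hm]
    · have hc : ws.count w = 0 := List.count_eq_zero.mpr hm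
      rw [if_pos hc, List.append_nil]
      rw [ih (s + 1) out (fun q hq => lt_trans (h q hq) (by omega))]
      simp [postingsOf, hm]

-- the doc indices appearing in the postings list are distinct
theorem postings_fst_nodup (contents : List (List String)) (s : Int) (w : String) :
    ((((PySem.List.enumerate contents s).filter (fun p => decide (w ∈ p.2)))).map
      (fun p => p.1)).Nodup := by
  have hp : ((PySem.List.enumerate contents s).filter (fun p => decide (w ∈ p.2))).Pairwise
      (fun p q => p.1 < q.1) :=
    (PySem.List.pairwise_lt_enumerate contents s).filter _
  exact List.pairwise_map.mpr (hp.imp (fun h => ne_of_lt h))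

-- A's inner fold over documents has exactly the postings list as its items
theorem A_inner_items (contents : List (List String)) (s : Int) (w : String) :
    ((PySem.List.enumerate contents s).foldl
      (fun (d : PySem.Dict Int Int) p => if w ∈ p.2 then d.insert p.1 (p.2.count w : Int) else d)
      PySem.Dict.empty).items = postingsOf contents s w := by
  rw [PySem.List.foldl_ite_eq_foldl_filter (fun (q : Int × List String) => w ∈ q.2)
    (fun (d : PySem.Dict Int Int) q => d.insert q.1 (q.2.count w : Int))
    (PySem.List.enumerate contents s) PySem.Dict.empty]
  have hfresh := PySem.Dict.items_foldl_insert_fresh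
    ((PySem.List.enumerate contents s).filter (fun q => decide (w ∈ q.2)))
    (fun (q : Int × List String) => q.1) (fun q => (q.2.count w : Int))
    PySem.Dict.empty (by simp) (postings_fst_nodup contents s w)
  simpa [postingsOf] using hfresh

-- a dict built from pairs with distinct keys lists exactly those pairs
theorem ofList_items (l : List (Int × Int)) (h : (l.map (fun p => p.1)).Nodup) :
    (PySem.Dict.ofList l).items = l := by
  have := PySem.Dict.items_foldl_insert_fresh l (fun p => p.1) (fun p => p.2)
    PySem.Dict.empty (by simp) h
  simp only [PySem.Dict.ofList, PySem.Dict.update] at *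
  simpa using this

-- per word: A's inner dict and B's run-length-encoded dict list the same items
theorem inner_items_eq (contents : List (List String)) (w : String) :
    (((PySem.List.enumerate contents 0).foldl
      (fun (st : PySem.Dict String (PySem.Dict Int Int) × PySem.Dict Int Int) p =>
        (p.2.foldl (initA_inner p.1) st.1, st.2.insert p.1 (p.2.length : Int)))
      (PySem.Dict.empty, PySem.Dict.empty)).1.getD w PySem.Dict.empty).items =
    (PySem.Dict.ofList (rle ((pvGroups contents).getD w []))).items := by
  rw [outerA_getD contents 0 PySem.Dict.empty PySem.Dict.empty w
    ⟨by simp [PySem.Dict.keys_empty], by intro p hp; simp [PySem.Dict.empty] at hp⟩]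
  rw [PySem.Dict.getD_empty, A_inner_items contents 0 w]
  rw [groups_getD contents w]
  unfold rle
  rw [rle_blocks contents w 0 [] (by simp)]
  rw [List.nil_append]
  rw [ofList_items _ (by
    have : (postingsOf contents 0 w).map (fun p => p.1) =
        (((PySem.List.enumerate contents 0).filter (fun p => decide (w ∈ p.2)))).map
          (fun p => p.1) := by
      simp [postingsOf, List.map_map, Function.comp]
    rw [this]; exact postings_fst_nodup contents 0 w)]

-- ===== VERDICT (by name: the statement is the Claim_ definition above) =====
theorem init_revindex_spec : Claim_equal_init_revindex := by
  intro contents _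
  show init_revindex contents = init_revindex_alt contents
  unfold init_revindex init_revindex_alt
  refine Prod.ext ?_ ?_
  · -- revindex components
    show (((PySem.List.enumerate contents 0).foldl _ (PySem.Dict.empty, PySem.Dict.empty)).1.items.map _) = _
    -- A side keys
    have hkeysA := outerA_keys contents 0 PySem.Dict.empty PySem.Dict.empty
    rw [PySem.Dict.keys_empty, PySem.Set.update_nil_left] at hkeysA
    have hndA : (((PySem.List.enumerate contents 0).foldl
        (fun (st : PySem.Dict String (PySem.Dict Int Int) × PySem.Dict Int Int) p =>
          (p.2.foldl (initA_inner p.1) st.1, st.2.insert p.1 (p.2.length : Int)))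
        (PySem.Dict.empty, PySem.Dict.empty)).1).keys.Nodup := by
      rw [hkeysA]; exact PySem.Set.nodup_ofList _
    -- B side keys
    have hkeysB : (pvGroups contents).keys = PySem.Set.ofList contents.flatten := by
      unfold pvGroups
      rw [PySem.Dict.keys_foldl_modify_key (pvOcc contents) (fun p => p.1) []
        (fun _ p l => l ++ [p.2]) PySem.Dict.empty]
      rw [PySem.Dict.keys_empty, PySem.Set.update_nil_left, occ_map_fst]
    have hndB : (pvGroups contents).keys.Nodup := by
      rw [hkeysB]; exact PySem.Set.nodup_ofList _
    -- B revindex items: one fresh insert per distinct word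
    have hitemsB := PySem.Dict.items_foldl_insert_fresh (pvGroups contents).items
      (fun p => p.1) (fun p => PySem.Dict.ofList (rle p.2)) PySem.Dict.empty
      (by simp) (by simpa [PySem.Dict.keys] using hndB)
    simp only [PySem.Dict.items] at *
    rw [hitemsB]
    rw [PySem.Dict.items_eq_map_keys _ hndA PySem.Dict.empty,
      PySem.Dict.items_eq_map_keys (pvGroups contents) hndB []]
    rw [hkeysA, hkeysB]
    have hemp : (PySem.Dict.empty : PySem.Dict String (PySem.Dict Int Int)).items = [] := rfl
    rw [hemp, List.nil_append]
    simp only [List.map_map]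
    refine List.map_congr_left (fun w _ => ?_)
    simp only [Function.comp_apply]
    exact congrArg (fun l => (w, l)) (inner_items_eq contents w)
  · exact congrArg PySem.Dict.items (outerA_snd contents 0 PySem.Dict.empty PySem.Dict.empty)
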